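-- pv_equiv track=rewrite | github.com/zinan16/comp110-25f-workspace | lecture/practice.py | sum_or_factorial
-- ===== SOURCE A (Python) =====
-- def sum_or_factorial(number: int) -> int:
--     if number < 0:
--         return -1
--     elif number % 2 == 0:
--         sum: int = 0
--         i: int = 0
--         while i <= number:
--             sum = sum + i
--             i = i + 1
--         return sum
--     else:
--         factorial: int = 1
--         i: int = 1
--         while i <= number:
--             factorial = i * factorial
--             i = i + 1
--         return factorial
-- ===== SOURCE B (Python) =====
-- def sum_or_factorial(number: int) -> int:
--     if number < 0:
--         return -1
--     if number % 2 == 0: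
--         return number * (number + 1) // 2
--     factorial = 1
--     for i in range(number, 1, -1):
--         factorial *= i
--     return factorial
-- ===== Notes on version B (the rewrite author's own statement) =====
-- stated objective: faster
-- what changed: Even branch replaces the O(n) accumulation loop with the closed-form Gauss formula n*(n+1)//2; odd branch computes the factorial by folding a descending range(number,1,-1) instead of an ascending while-loop with a counter.
import Mathlib
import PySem

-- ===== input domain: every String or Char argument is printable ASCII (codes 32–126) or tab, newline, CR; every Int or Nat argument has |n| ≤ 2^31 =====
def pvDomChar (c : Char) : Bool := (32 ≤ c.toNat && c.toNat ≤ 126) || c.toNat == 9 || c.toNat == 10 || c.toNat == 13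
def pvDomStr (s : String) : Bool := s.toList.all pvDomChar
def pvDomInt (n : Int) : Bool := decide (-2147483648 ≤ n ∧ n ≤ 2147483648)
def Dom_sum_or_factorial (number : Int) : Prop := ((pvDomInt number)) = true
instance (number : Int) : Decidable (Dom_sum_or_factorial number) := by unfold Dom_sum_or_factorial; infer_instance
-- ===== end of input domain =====

-- B changes the even branch to the closed-form Gauss formula (O(1)) and computes the odd
-- branch's factorial by folding a descending range instead of an ascending counter loop.

-- ===== PORT A =====
-- while i <= number: sum = sum + i; i = i + 1
def sofSumGo (s i number : Int) : Int :=
  if i ≤ number then sofSumGo (s + i) (i + 1) number else s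
termination_by (number + 1 - i).toNat
decreasing_by omega

-- while i <= number: factorial = i * factorial; i = i + 1
def sofFactGo (f i number : Int) : Int :=
  if i ≤ number then sofFactGo (i * f) (i + 1) number else f
termination_by (number + 1 - i).toNat
decreasing_by omega

def sum_or_factorial (number : Int) : Int :=
  if number < 0 then -1
  else if PySem.Int.mod number 2 = 0 then sofSumGo 0 0 number
  else sofFactGo 1 1 number

-- ===== PORT B =====
def sum_or_factorial_alt (number : Int) : Int :=
  if number < 0 then -1
  else if PySem.Int.mod number 2 = 0 then PySem.Int.floordiv (number * (number + 1)) 2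
  else (PySem.List.pyRange number 1 (-1)).foldl (fun f i => f * i) 1

-- ===== PRECONDITION & SPEC =====
def Spec_sum_or_factorial (number : Int) (out : Int) : Prop := out = sum_or_factorial_alt number
instance (number : Int) (out : Int) : Decidable (Spec_sum_or_factorial number out) := by unfold Spec_sum_or_factorial; infer_instance

-- ===== CLAIM (what is proved, stated in full; the proofs are below) =====
def Claim_equal_sum_or_factorial : Prop := ∀ (number : Int), Dom_sum_or_factorial number → Spec_sum_or_factorial number (sum_or_factorial number)

-- ===== LEMMAS AND PROOFS =====

-- Gauss invariant for A's summation loop.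
theorem sofSumGo_gauss (k : Nat) : ∀ (s i n : Int), (n + 1 - i).toNat = k → i ≤ n + 1 →
    2 * sofSumGo s i n = 2 * s + (n + 1 - i) * (n + i) := by
  induction k with
  | zero =>
    intro s i n hk hle
    have hin : n < i := by omega
    rw [sofSumGo, if_neg (by omega)]
    have : i = n + 1 := by omega
    subst this; ring
  | succ k ih =>
    intro s i n hk hle
    have hin : i ≤ n := by omega
    rw [sofSumGo, if_pos hin]
    rw [ih (s + i) (i + 1) n (by omega) (by omega)]
    ring

-- Scaling the accumulator out of A's factorial loop.
theorem sofFactGo_scale (k : Nat) : ∀ (f i n : Int), (n + 1 - i).toNat = k →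
    sofFactGo f i n = f * sofFactGo 1 i n := by
  induction k with
  | zero =>
    intro f i n hk
    rw [sofFactGo, if_neg (by omega), sofFactGo, if_neg (by omega)]; ring
  | succ k ih =>
    intro f i n hk
    by_cases h : i ≤ n
    · rw [sofFactGo, if_pos h]
      conv_rhs => rw [sofFactGo, if_pos h]
      rw [ih (i * f) (i + 1) n (by omega), ih (i * 1) (i + 1) n (by omega)]
      ring
    · rw [sofFactGo, if_neg h, sofFactGo, if_neg h]; ring

-- A's factorial loop is the product of the ascending range [i, n].
theorem sofFactGo_prod (k : Nat) : ∀ (i n : Int), (n + 1 - i).toNat = k →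
    sofFactGo 1 i n = (PySem.List.pyRange i (n + 1) 1).prod := by
  induction k with
  | zero =>
    intro i n hk
    rw [sofFactGo, if_neg (by omega), PySem.List.pyRange_one_eq_nil (by omega)]
    simp
  | succ k ih =>
    intro i n hk
    have h : i ≤ n := by omega
    rw [sofFactGo, if_pos h, sofFactGo_scale k (i * 1) (i + 1) n (by omega),
      ih (i + 1) n (by omega), PySem.List.pyRange_one_cons (by omega : i < n + 1)]
    simp

theorem foldl_mul_prod (xs : List Int) : xs.foldl (fun f i => f * i) 1 = xs.prod := by
  rw [List.prod_eq_foldl]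

theorem sum_or_factorial_spec' : ∀ (number : Int),
    sum_or_factorial number = sum_or_factorial_alt number := by
  intro n
  unfold sum_or_factorial sum_or_factorial_alt
  by_cases hneg : n < 0
  · simp [hneg]
  · rw [if_neg hneg, if_neg hneg]
    by_cases heven : PySem.Int.mod n 2 = 0
    · rw [if_pos heven, if_pos heven]
      have h2 : 2 * sofSumGo 0 0 n = 2 * 0 + (n + 1 - 0) * (n + 0) :=
        sofSumGo_gauss (n + 1 - 0).toNat 0 0 n rfl (by omega)
      have := (PySem.Int.floordiv_eq_iff_of_pos (a := n * (n + 1)) (b := 2)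
        (q := sofSumGo 0 0 n) (by omega)).mpr (by constructor <;> nlinarith)
      omega
    · rw [if_neg heven, if_neg heven]
      have hpos : 1 ≤ n := by
        rcases lt_or_ge n 1 with h | h
        · exfalso
          have h0 : n = 0 := by omega
          subst h0
          exact heven (by decide)
        · exact h
      rw [sofFactGo_prod (n + 1 - 1).toNat 1 n rfl,
        PySem.List.pyRange_neg_one_eq_reverse, foldl_mul_prod, List.prod_reverse,
        PySem.List.pyRange_one_cons (by omega : (1:Int) < n + 1)]
      simp

-- ===== VERDICT (by name: the statement is the Claim_ definition above) =====
theorem sum_or_factorial_spec : Claim_equal_sum_or_factorial := by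
  intro n _
  exact sum_or_factorial_spec' n
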